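-- pv_equiv track=rewrite | github.com/Ralyhu/CMAB-CC | code/util.py | get_size_clusters
-- ===== SOURCE A (Python) =====
-- def get_size_clusters(cluster_membership):
--     res = {}
--     for label in cluster_membership:
--         try:
--             res[label] += 1
--         except:
--             res[label] = 1
--     return res
-- ===== SOURCE B (Python) =====
-- def get_size_clusters(cluster_membership):
--     items = list(cluster_membership)
--     return {label: items.count(label) for label in dict.fromkeys(items)}
-- ===== Notes on version B (the rewrite author's own statement) =====
-- stated objective: alternative
-- what changed: B replaces A's single accumulating try/except dict pass with a two-phase scheme: deduplicate the labels in first-occurrence order, then count each distinct label with list.count.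
import Mathlib
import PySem

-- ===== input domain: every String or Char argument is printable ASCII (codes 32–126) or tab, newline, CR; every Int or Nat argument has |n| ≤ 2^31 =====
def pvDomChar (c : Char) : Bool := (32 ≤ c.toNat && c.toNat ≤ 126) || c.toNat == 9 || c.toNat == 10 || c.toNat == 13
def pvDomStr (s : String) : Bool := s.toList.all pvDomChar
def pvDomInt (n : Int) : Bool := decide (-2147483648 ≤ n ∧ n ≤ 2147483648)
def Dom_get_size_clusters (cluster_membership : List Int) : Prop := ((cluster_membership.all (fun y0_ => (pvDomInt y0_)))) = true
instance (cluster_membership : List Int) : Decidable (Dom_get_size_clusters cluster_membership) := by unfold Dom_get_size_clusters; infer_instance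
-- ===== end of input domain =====

-- B counts cluster sizes by deduplicating labels (first-occurrence order) and counting each with list.count, instead of A's accumulating try/except dict pass (alternative decomposition, same results).


-- ===== PORT A =====
-- Port of A: try res[label] += 1 / except: res[label] = 1, over an insertion-ordered dict.
def get_size_clusters (cluster_membership : List Int) : List (Int × Int) :=
  (cluster_membership.foldl
    (fun res label =>
      match res.get? label with
      | some n => res.insert label (n + 1)   -- res[label] += 1
      | none   => res.insert label 1        -- except: res[label] = 1
    ) PySem.Dict.empty).items

-- ===== PORT B =====
-- Port of B: distinct labels in first-occurrence order (dict.fromkeys), then list.count per label.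
def get_size_clusters_alt (cluster_membership : List Int) : List (Int × Int) :=
  (PySem.List.dedup cluster_membership).map
    (fun label => (label, (cluster_membership.count label : Int)))

-- ===== PRECONDITION & SPEC =====
def Spec_get_size_clusters (cluster_membership : List Int) (out : List (Int × Int)) : Prop := out = get_size_clusters_alt cluster_membership
instance (cluster_membership : List Int) (out : List (Int × Int)) : Decidable (Spec_get_size_clusters cluster_membership out) := by unfold Spec_get_size_clusters; infer_instance

-- ===== CLAIM (what is proved, stated in full; the proofs are below) =====
def Claim_equal_get_size_clusters : Prop := ∀ (cluster_membership : List Int), Dom_get_size_clusters cluster_membership → Spec_get_size_clusters cluster_membership (get_size_clusters cluster_membership)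

-- ===== LEMMAS AND PROOFS =====

-- ===== VERDICT (by name: the statement is the Claim_ definition above) =====
-- A's match-on-get? update step is the insert/getD counting step.
theorem step_eq :
    (fun (res : PySem.Dict Int Int) (label : Int) =>
      match res.get? label with
      | some n => res.insert label (n + 1)
      | none   => res.insert label 1)
    = (fun (d : PySem.Dict Int Int) (x : Int) => d.insert x (d.getD x 0 + 1)) := by
  funext res label
  cases h : res.get? label with
  | some n => simp [PySem.Dict.getD, h]
  | none => simp [PySem.Dict.getD, h]

theorem get_size_clusters_spec : Claim_equal_get_size_clusters := by
  intro xs _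
  unfold Spec_get_size_clusters get_size_clusters get_size_clusters_alt
  rw [step_eq, PySem.Dict.foldl_insert_getD_add_one_eq_counter, PySem.Dict.items_counter,
    PySem.List.dedup_eq_ofList]
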